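-- pv_equiv track=rewrite | github.com/tn82/advent-of-code | 2023/day16/aoc.py | litter
-- ===== SOURCE A (Python) =====
-- def litter(grid, sx, sy, d):
--     litt = {}
--     q = [(d, sx, sy)]
--     while q:
--         d, x, y = q.pop()
--         if (x, y) not in grid:
--             continue
--         if (x, y, d) in litt:
--             continue
--         litt[(x, y, d)] = 1
--         val = grid[(x, y)]
--         if d == "L":
--             if val == ".":
--                 q.append((d, x, y - 1))
--             elif val == "-":
--                 q.append((d, x, y - 1))
--             elif val == "/":
--                 q.append(("D", x + 1, y))
--             elif val == "T":
--                 q.append(("U", x - 1, y))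
--             elif val == "|":
--                 q.append(("D", x + 1, y))
--                 q.append(("U", x - 1, y))
--
--         elif d == "R":
--             if val == ".":
--                 q.append((d, x, y + 1))
--             elif val == "-":
--                 q.append((d, x, y + 1))
--             elif val == "/":
--                 q.append(("U", x - 1, y))
--             elif val == "T":
--                 q.append(("D", x + 1, y))
--             elif val == "|":
--                 q.append(("D", x + 1, y))
--                 q.append(("U", x - 1, y))
--
--         elif d == "D":
--             if val == ".":
--                 q.append((d, x + 1, y))
--             elif val == "-":
--                 q.append(("L", x, y - 1))
--                 q.append(("R", x, y + 1))
--             elif val == "/":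
--                 q.append(("L", x, y - 1))
--             elif val == "T":
--                 q.append(("R", x, y + 1))
--             elif val == "|":
--                 q.append((d, x + 1, y))
--
--         elif d == "U":
--             if val == ".":
--                 q.append((d, x - 1, y))
--             elif val == "-":
--                 q.append(("L", x, y - 1))
--                 q.append(("R", x, y + 1))
--             elif val == "/":
--                 q.append(("R", x, y + 1))
--             elif val == "T":
--                 q.append(("L", x, y - 1))
--             elif val == "|":
--                 q.append((d, x - 1, y))
--
--
--     litt_u = {}
--     for k, v in litt.items():
--         litt_u[(k[0], k[1])] = 1
--     return sum(litt_u.values())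
-- ===== SOURCE B (Python) =====
-- def litter(grid, sx, sy, d):
--     VEC = {"L": (0, -1), "R": (0, 1), "D": (1, 0), "U": (-1, 0)}
--     NAME = {(0, -1): "L", (0, 1): "R", (1, 0): "D", (-1, 0): "U"}
--     visited = set()
--
--     def succs(val, dx, dy):
--         # mirror/splitter rules expressed as vector arithmetic on the beam's delta
--         if val == ".":
--             return [(dx, dy)]
--         if val == "/":
--             return [(-dy, -dx)]
--         if val == "T":
--             return [(dy, dx)]
--         if val == "-":
--             return [(dx, dy)] if dx == 0 else [(0, 1), (0, -1)]
--         if val == "|":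
--             return [(dx, dy)] if dy == 0 else [(-1, 0), (1, 0)]
--         return []
--
--     def visit(d, x, y):
--         if (x, y) not in grid or (x, y, d) in visited:
--             return
--         visited.add((x, y, d))
--         v = VEC.get(d)
--         if v is None:
--             return
--         for (ndx, ndy) in succs(grid[(x, y)], v[0], v[1]):
--             visit(NAME.get((ndx, ndy), ""), x + ndx, y + ndy)
--
--     visit(d, sx, sy)
--     return len({(x, y) for (x, y, _) in visited})
-- ===== Notes on version B (the rewrite author's own statement) =====
-- stated objective: alternative
-- what changed: A's explicit-stack worklist loop with a 20-branch per-direction-string elif cascade and a second dict pass for counting is replaced by a recursive DFS whose mirror/splitter transitions are vector arithmetic on the beam's delta (direction-name/unit-vector lookup tables, negate/swap for mirrors), counting energized cells with a set comprehension.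
import Mathlib
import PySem

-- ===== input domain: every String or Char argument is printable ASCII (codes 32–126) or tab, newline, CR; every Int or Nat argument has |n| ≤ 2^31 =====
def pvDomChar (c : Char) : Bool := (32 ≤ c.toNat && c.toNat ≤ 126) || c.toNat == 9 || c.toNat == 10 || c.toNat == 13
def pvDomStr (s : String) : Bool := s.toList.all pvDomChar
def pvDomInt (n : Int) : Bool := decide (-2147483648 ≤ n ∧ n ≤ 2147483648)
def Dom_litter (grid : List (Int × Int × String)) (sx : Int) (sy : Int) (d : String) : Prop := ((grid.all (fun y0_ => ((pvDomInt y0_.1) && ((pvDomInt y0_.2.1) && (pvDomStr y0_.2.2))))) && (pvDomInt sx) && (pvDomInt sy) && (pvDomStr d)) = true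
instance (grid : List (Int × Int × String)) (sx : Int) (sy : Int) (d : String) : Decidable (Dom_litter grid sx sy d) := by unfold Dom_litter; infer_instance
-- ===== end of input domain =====

-- B replaces A's explicit-stack loop with its per-direction string-case elif cascade by a
-- recursive DFS whose mirror/splitter rules are vector arithmetic on the beam's delta
-- (direction name ↔ unit vector tables); alternative decomposition, same cost.

-- ===== PORT A =====

-- the dict[tuple[int,int], str] parameter, decoded from its association list (shared by both ports)
def pvGridDict (grid : List (Int × Int × String)) : PySem.Dict (Int × Int) String :=
  PySem.Dict.ofList (grid.map (fun t => ((t.1, t.2.1), t.2.2)))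

-- A's per-direction elif cascade: performs the q.append calls on the stack (top = head, so each
-- append conses; two appends leave the SECOND one on top, hence the reversed cons order for "|"/"-")
def pvBranchA (dd val : String) (x y : Int) (q : List (String × Int × Int)) : List (String × Int × Int) :=
  if dd = "L" then
    if val = "." then (dd, x, y - 1) :: q
    else if val = "-" then (dd, x, y - 1) :: q
    else if val = "/" then ("D", x + 1, y) :: q
    else if val = "T" then ("U", x - 1, y) :: q
    else if val = "|" then ("U", x - 1, y) :: ("D", x + 1, y) :: q
    else q
  else if dd = "R" then
    if val = "." then (dd, x, y + 1) :: q
    else if val = "-" then (dd, x, y + 1) :: q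
    else if val = "/" then ("U", x - 1, y) :: q
    else if val = "T" then ("D", x + 1, y) :: q
    else if val = "|" then ("U", x - 1, y) :: ("D", x + 1, y) :: q
    else q
  else if dd = "D" then
    if val = "." then (dd, x + 1, y) :: q
    else if val = "-" then ("R", x, y + 1) :: ("L", x, y - 1) :: q
    else if val = "/" then ("L", x, y - 1) :: q
    else if val = "T" then ("R", x, y + 1) :: q
    else if val = "|" then (dd, x + 1, y) :: q
    else q
  else if dd = "U" then
    if val = "." then (dd, x - 1, y) :: q
    else if val = "-" then ("R", x, y + 1) :: ("L", x, y - 1) :: q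
    else if val = "/" then ("R", x, y + 1) :: q
    else if val = "T" then ("L", x, y - 1) :: q
    else if val = "|" then (dd, x - 1, y) :: q
    else q
  else q

-- A's while loop; the Nat is a fuel bound on the number of litt insertions (a pure totality guard:
-- litt can hold at most 5·|grid| states, so the fuel passed below never runs out)
def pvLoopA (g : PySem.Dict (Int × Int) String) :
    Nat → PySem.Dict (Int × Int × String) Int → List (String × Int × Int) →
    PySem.Dict (Int × Int × String) Int
  | _, litt, [] => litt
  | f, litt, (dd, x, y) :: rest =>
    match g.get? (x, y) with
    | none => pvLoopA g f litt rest
    | some val =>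
      if litt.contains (x, y, dd) then pvLoopA g f litt rest
      else if hf : f = 0 then litt
      else pvLoopA g (f - 1) (litt.insert (x, y, dd) 1) (pvBranchA dd val x y rest)
  termination_by f _ q => (f, q.length)
  decreasing_by
    all_goals first
      | exact Prod.Lex.left _ _ (by omega)
      | exact Prod.Lex.right _ (by omega)
      | exact Prod.Lex.right _ (by simp)

def litter (grid : List (Int × Int × String)) (sx : Int) (sy : Int) (d : String) : Int :=
  let g := pvGridDict grid
  let litt := pvLoopA g (5 * grid.length + 5) PySem.Dict.empty [(d, sx, sy)]
  (litt.items.foldl (fun litt_u kv => litt_u.insert (kv.1.1, kv.1.2.1) (1 : Int))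
    PySem.Dict.empty).values.sum

-- ===== PORT B =====

-- VEC.get(d): direction name → unit delta
def pvVecB (d : String) : Option (Int × Int) :=
  if d = "L" then some (0, -1)
  else if d = "R" then some (0, 1)
  else if d = "D" then some (1, 0)
  else if d = "U" then some (-1, 0)
  else none

-- NAME.get((dx, dy), ""): unit delta → direction name
def pvNameB (dx dy : Int) : String :=
  if dx = 0 ∧ dy = -1 then "L"
  else if dx = 0 ∧ dy = 1 then "R"
  else if dx = 1 ∧ dy = 0 then "D"
  else if dx = -1 ∧ dy = 0 then "U"
  else ""

-- succs: mirror/splitter rules as vector arithmetic on the beam's delta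
def pvSuccsB (val : String) (dx dy : Int) : List (Int × Int) :=
  if val = "." then [(dx, dy)]
  else if val = "/" then [(-dy, -dx)]
  else if val = "T" then [(dy, dx)]
  else if val = "-" then if dx = 0 then [(dx, dy)] else [(0, 1), (0, -1)]
  else if val = "|" then if dy = 0 then [(dx, dy)] else [(-1, 0), (1, 0)]
  else []

-- the states visit recurses on: VEC lookup (None → no successors, like Source B's early return),
-- then each new delta moved one step and named
def pvSuccStatesB (val d : String) (x y : Int) : List (String × Int × Int) :=
  match pvVecB d with
  | none => []
  | some (dx, dy) =>
    (pvSuccsB val dx dy).map (fun p => (pvNameB p.1 p.2, x + p.1, y + p.2))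

theorem pvLexMin (a f m n : Nat) (h : m < n) :
    Prod.Lex (· < ·) (· < ·) ((min a f : Nat), m) (f, n) := by
  rcases Nat.lt_or_ge (min a f) f with h' | h'
  · exact Prod.Lex.left _ _ h'
  · have hm : min a f = f := by omega
    rw [hm]; exact Prod.Lex.right _ h

-- B's recursive visit: pvVisitB is Python's visit(d, x, y), pvVisitSeq its for-loop over the
-- successors.  The Nat fuel (decremented once per newly visited state, threaded through the
-- recursion) and the 'min' cap are totality guards only: fuel never runs out at the bound used
-- below, and min is the identity there (pvVisitSeq_fuel_le below).
mutual
def pvVisitB (g : PySem.Dict (Int × Int) String) :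
    Nat → PySem.Set (Int × Int × String) → (String × Int × Int) →
    PySem.Set (Int × Int × String) × Nat
  | f, vis, (dd, x, y) =>
    match g.get? (x, y) with
    | none => (vis, f)
    | some val =>
      if PySem.Set.contains vis (x, y, dd) then (vis, f)
      else if hf : f = 0 then (vis, 0)
      else pvVisitSeq g (f - 1) (PySem.Set.add vis (x, y, dd)) (pvSuccStatesB val dd x y)
  termination_by f _ _ => (f, 0)
  decreasing_by exact Prod.Lex.left _ _ (by omega)

def pvVisitSeq (g : PySem.Dict (Int × Int) String) :
    Nat → PySem.Set (Int × Int × String) → List (String × Int × Int) →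
    PySem.Set (Int × Int × String) × Nat
  | f, vis, [] => (vis, f)
  | f, vis, s :: ss =>
    let p := pvVisitB g f vis s
    pvVisitSeq g (min p.2 f) p.1 ss
  termination_by f _ l => (f, l.length + 1)
  decreasing_by
    · exact Prod.Lex.right _ (by omega)
    · exact pvLexMin _ _ _ _ (by simp)
end

def litter_alt (grid : List (Int × Int × String)) (sx : Int) (sy : Int) (d : String) : Int :=
  let g := pvGridDict grid
  let visited := (pvVisitB g (5 * grid.length + 5) PySem.Set.empty (d, sx, sy)).1
  PySem.Set.len (PySem.Set.ofList (visited.map (fun t => (t.1, t.2.1))))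

-- ===== PRECONDITION & SPEC =====
def Spec_litter (grid : List (Int × Int × String)) (sx : Int) (sy : Int) (d : String) (out : Int) : Prop := out = litter_alt grid sx sy d
instance (grid : List (Int × Int × String)) (sx : Int) (sy : Int) (d : String) (out : Int) : Decidable (Spec_litter grid sx sy d out) := by unfold Spec_litter; infer_instance

-- ===== CLAIM (what is proved, stated in full; the proofs are below) =====
def Claim_equal_litter : Prop := ∀ (grid : List (Int × Int × String)) (sx : Int) (sy : Int) (d : String), Dom_litter grid sx sy d → Spec_litter grid sx sy d (litter grid sx sy d)

-- ===== LEMMAS AND PROOFS =====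

-- A's dict litt always maps every key to 1; it is determined by B's visited list
def pvMk (vis : List (Int × Int × String)) : PySem.Dict (Int × Int × String) Int :=
  PySem.Dict.mk (vis.map (fun k => (k, (1 : Int))))

theorem pvMk_contains (vis : List (Int × Int × String)) (k : Int × Int × String) :
    (pvMk vis).contains k = PySem.Set.contains vis k := by
  induction vis with
  | nil => simp [pvMk, PySem.Dict.contains, PySem.Set.contains]
  | cons a l ih =>
    simp [pvMk, PySem.Dict.contains, PySem.Set.contains] at ih ⊢
    rw [ih]
    by_cases hak : k = a
    · subst hak; simp
    · have h1 : (a == k) = false := beq_eq_false_iff_ne.mpr (Ne.symm hak)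
      simp [h1, hak]

theorem pvMk_insert (vis : List (Int × Int × String)) (k : Int × Int × String)
    (h : PySem.Set.contains vis k = false) :
    (pvMk vis).insert k 1 = pvMk (PySem.Set.add vis k) := by
  have hm : k ∉ vis := by simpa [PySem.Set.contains] using h
  simp [PySem.Dict.insert, PySem.Set.add, hm, pvMk, PySem.Dict.contains, PySem.Set.contains]

-- A's cascade performs exactly B's successor-state list, pushed on top of the stack
set_option maxHeartbeats 1000000 in
theorem pvBranchA_eq (dd val : String) (x y : Int) (q : List (String × Int × Int)) :
    pvBranchA dd val x y q = pvSuccStatesB val dd x y ++ q := by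
  unfold pvBranchA pvSuccStatesB pvVecB pvSuccsB pvNameB
  by_cases h1 : dd = "L" <;> by_cases h2 : dd = "R" <;> by_cases h3 : dd = "D" <;>
    by_cases h4 : dd = "U" <;> simp_all <;>
  (by_cases v1 : val = "." <;> by_cases v2 : val = "-" <;> by_cases v3 : val = "/" <;>
    by_cases v4 : val = "T" <;> by_cases v5 : val = "|" <;>
    simp_all <;> norm_num [sub_eq_add_neg])

theorem pvVisitSeq_fuel_le (g : PySem.Dict (Int × Int) String) :
    ∀ (l : List (String × Int × Int)) (f : Nat) (vis : PySem.Set (Int × Int × String)),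
      (pvVisitSeq g f vis l).2 ≤ f := by
  intro l
  induction l with
  | nil => intro f vis; simp [pvVisitSeq]
  | cons s ss ih =>
    intro f vis
    simp only [pvVisitSeq]
    exact le_trans (ih _ _) (Nat.min_le_right _ _)

theorem pvVisitB_fuel_le (g : PySem.Dict (Int × Int) String)
    (f : Nat) (vis : PySem.Set (Int × Int × String)) (s : String × Int × Int) :
    (pvVisitB g f vis s).2 ≤ f := by
  obtain ⟨dd, x, y⟩ := s
  rw [pvVisitB]
  cases hg : PySem.Dict.get? g (x, y) with
  | none => simp
  | some val =>
    by_cases hc : (x, y, dd) ∈ vis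
    · simp [PySem.Set.contains, hc]
    · cases f with
      | zero => simp [PySem.Set.contains, hc]
      | succ f' =>
        simp only [PySem.Set.contains, List.contains_eq_mem, hc, decide_false,
          Bool.false_eq_true, if_false, dif_neg f'.succ_ne_zero, Nat.add_sub_cancel]
        exact le_trans (pvVisitSeq_fuel_le g _ _ _) (Nat.le_succ _)

theorem pvVisitSeq_cons (g : PySem.Dict (Int × Int) String) (f : Nat)
    (vis : PySem.Set (Int × Int × String)) (s : String × Int × Int)
    (ss : List (String × Int × Int)) :
    pvVisitSeq g f vis (s :: ss) =
      pvVisitSeq g (pvVisitB g f vis s).2 (pvVisitB g f vis s).1 ss := by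
  simp only [pvVisitSeq]
  rw [Nat.min_eq_left (pvVisitB_fuel_le g f vis s)]

theorem pvVisitSeq_append (g : PySem.Dict (Int × Int) String) :
    ∀ (l1 l2 : List (String × Int × Int)) (f : Nat) (vis : PySem.Set (Int × Int × String)),
      pvVisitSeq g f vis (l1 ++ l2) =
        pvVisitSeq g (pvVisitSeq g f vis l1).2 (pvVisitSeq g f vis l1).1 l2 := by
  intro l1
  induction l1 with
  | nil => intro l2 f vis; simp [pvVisitSeq]
  | cons s ss ih =>
    intro l2 f vis
    simp only [List.cons_append, pvVisitSeq]
    exact ih _ _ _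

theorem pvVisitSeq_zero (g : PySem.Dict (Int × Int) String) :
    ∀ (l : List (String × Int × Int)) (vis : PySem.Set (Int × Int × String)),
      pvVisitSeq g 0 vis l = (vis, 0) := by
  have hB : ∀ (vis : PySem.Set (Int × Int × String)) (s : String × Int × Int),
      pvVisitB g 0 vis s = (vis, 0) := by
    intro vis ⟨dd, x, y⟩
    rw [pvVisitB]
    cases hg : PySem.Dict.get? g (x, y) with
    | none => simp
    | some val => by_cases hc : (x, y, dd) ∈ vis <;> simp [PySem.Set.contains, hc]
  intro l
  induction l with
  | nil => intro vis; simp [pvVisitSeq]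
  | cons s ss ih =>
    intro vis
    simp only [pvVisitSeq, hB]
    exact ih _

theorem pvLoopA_zero (g : PySem.Dict (Int × Int) String) :
    ∀ (q : List (String × Int × Int)) (litt : PySem.Dict (Int × Int × String) Int),
      pvLoopA g 0 litt q = litt := by
  intro q
  induction q with
  | nil => intro litt; rw [pvLoopA]
  | cons s rest ih =>
    intro litt
    obtain ⟨dd, x, y⟩ := s
    rw [pvLoopA]
    cases hg : PySem.Dict.get? g (x, y) with
    | none => simp [ih]
    | some val => by_cases hc : litt.contains (x, y, dd) = true <;> simp [hc, ih]

-- the simulation: running A's stack loop on a block q is running B's visits over q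
theorem pv_sim (g : PySem.Dict (Int × Int) String) :
    ∀ (f : Nat) (q : List (String × Int × Int)) (vis : PySem.Set (Int × Int × String))
      (rest : List (String × Int × Int)),
      pvLoopA g f (pvMk vis) (q ++ rest) =
        pvLoopA g (pvVisitSeq g f vis q).2 (pvMk (pvVisitSeq g f vis q).1) rest := by
  intro f
  induction f using Nat.strong_induction_on with
  | _ f IH =>
    intro q vis rest
    induction q generalizing vis rest with
    | nil => simp [pvVisitSeq]
    | cons s q' ihq =>
      obtain ⟨dd, x, y⟩ := s
      rw [List.cons_append, pvLoopA, pvVisitSeq_cons, pvVisitB]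
      cases hg : PySem.Dict.get? g (x, y) with
      | none => simp only [hg]; exact ihq vis rest
      | some val =>
        simp only [hg]
        by_cases hc : (x, y, dd) ∈ vis
        · have h1 : (pvMk vis).contains (x, y, dd) = true := by
            rw [pvMk_contains]; simpa [PySem.Set.contains]
          have h2 : PySem.Set.contains vis (x, y, dd) = true := by
            simpa [PySem.Set.contains]
          simp only [h1, h2, if_true]
          exact ihq vis rest
        · have h2 : PySem.Set.contains vis (x, y, dd) = false := by
            simpa [PySem.Set.contains]
          have h1 : (pvMk vis).contains (x, y, dd) = false := by
            rw [pvMk_contains, h2]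
          simp only [h1, h2, Bool.false_eq_true, if_false]
          cases f with
          | zero =>
            simp [pvVisitSeq_zero, pvLoopA_zero g rest]
          | succ f' =>
            simp only [dif_neg f'.succ_ne_zero, Nat.add_sub_cancel]
            rw [pvMk_insert _ _ h2, pvBranchA_eq, ← List.append_assoc]
            rw [IH f' (Nat.lt_succ_self f') (pvSuccStatesB val dd x y ++ q')
              (PySem.Set.add vis (x, y, dd)) rest]
            rw [pvVisitSeq_append]

-- counting: A's second dict pass counts the distinct (x, y) among litt's keys
theorem pv_sum_ones : ∀ (vs : List Int), (∀ v ∈ vs, v = (1 : Int)) → vs.sum = vs.length := by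
  intro vs
  induction vs with
  | nil => simp
  | cons v t ih =>
    intro h
    have hv := h v (List.mem_cons_self)
    have ht := ih (fun w hw => h w (List.mem_cons_of_mem _ hw))
    simp [hv, ht]
    omega

theorem pv_count (vis : List (Int × Int × String)) :
    ((pvMk vis).items.foldl (fun litt_u kv => litt_u.insert (kv.1.1, kv.1.2.1) (1 : Int))
      PySem.Dict.empty).values.sum =
    PySem.Set.len (PySem.Set.ofList (vis.map (fun t => (t.1, t.2.1)))) := by
  have hones : ∀ (L : List ((Int × Int × String) × Int)) (du : PySem.Dict (Int × Int) Int),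
      (∀ v ∈ du.values, v = (1 : Int)) →
      ∀ v ∈ (L.foldl (fun litt_u kv => litt_u.insert (kv.1.1, kv.1.2.1) (1 : Int)) du).values,
        v = (1 : Int) := by
    intro L
    induction L with
    | nil => intro du h; exact h
    | cons kv L ih =>
      intro du h
      refine ih _ (fun w hw => ?_)
      have hw2 : w ∈ (du.insert (kv.1.1, kv.1.2.1) (1 : Int)).values := hw
      rcases PySem.Dict.mem_values_insert _ _ _ _ hw2 with h' | h'
      · exact h'
      · exact h w h'
  have h1 := pv_sum_ones _ (hones (pvMk vis).items PySem.Dict.empty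
    (by intro v hv; exact absurd hv (by rw [show (PySem.Dict.empty : PySem.Dict (Int × Int) Int).values = [] from rfl]; simp)))
  rw [h1]
  have hkeys := PySem.Dict.keys_foldl_insert_key (ν := Int) (pvMk vis).items
    (fun kv => (kv.1.1, kv.1.2.1)) (fun _ _ => (1 : Int)) PySem.Dict.empty
  have hlen : ∀ (D : PySem.Dict (Int × Int) Int), D.values.length = D.keys.length := by
    intro D; simp [PySem.Dict.values, PySem.Dict.keys]
  rw [hlen, hkeys]
  have hitems : (pvMk vis).items.map (fun kv => (kv.1.1, kv.1.2.1)) =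
      vis.map (fun t => (t.1, t.2.1)) := by
    simp [pvMk, PySem.Dict.items, List.map_map]
  simp [hitems, PySem.Set.len, PySem.Set.update_nil_left]

-- ===== VERDICT (by name: the statement is the Claim_ definition above) =====
theorem litter_spec : Claim_equal_litter := by
  intro grid sx sy d _
  unfold Spec_litter
  simp only [litter, litter_alt]
  have hsim := pv_sim (pvGridDict grid) (5 * grid.length + 5) [(d, sx, sy)] [] []
  simp only [List.append_nil] at hsim
  rw [pvVisitSeq_cons] at hsim
  have hempty : (pvMk [] : PySem.Dict (Int × Int × String) Int) = PySem.Dict.empty := rfl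
  rw [hempty] at hsim
  rw [hsim]
  rw [show ∀ (n : Nat) (dct : PySem.Dict (Int × Int × String) Int), pvLoopA (pvGridDict grid) n dct [] = dct from fun n dct => by rw [pvLoopA]]
  rw [show ∀ (n : Nat) (v : PySem.Set (Int × Int × String)), pvVisitSeq (pvGridDict grid) n v [] = (v, n) from fun n v => by rw [pvVisitSeq]]
  exact pv_count _
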